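-- pv_equiv track=rewrite | github.com/di-mooon/tasks_with_codewars | другие задачи/5ку/Decimal to Factorial and Back.py | dec_2_fact_string
-- ===== SOURCE A (Python) =====
-- import string as  st
--
-- def dec_2_fact_string(nb):
--     i = 1
--     string = ''
--     while nb > 0:
--         string += str(nb % i) if nb % i < 10 else st.ascii_lowercase[nb % i - 10]
--         nb //= i
--         i += 1
--     return string[::-1].upper()
-- ===== SOURCE B (Python) =====
-- import string as st
--
--
-- def dec_2_fact_string(nb):
--     if nb <= 0:
--         return ''
--     # table of factorials: facts[p] = p!, grown until the next one exceeds nb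
--     facts = [1]
--     while facts[-1] * len(facts) <= nb:
--         facts.append(facts[-1] * len(facts))
--     # one most-significant-first pass: digit at place p is nb // p!
--     out = []
--     for f in reversed(facts):
--         d = nb // f
--         nb %= f
--         out.append(str(d) if d < 10 else st.ascii_lowercase[d - 10])
--     return ''.join(out).upper()
-- ===== Notes on version B (the rewrite author's own statement) =====
-- stated objective: alternative
-- what changed: A extracts digits least-significant-first by repeated division (nb % i, nb //= i) and reverses the string at the end; B first builds the factorial place-value table, then emits digits most-significant-first in one pass (digit = nb // p!, nb %= p!), with an explicit empty-string return for nb <= 0.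
import Mathlib
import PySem

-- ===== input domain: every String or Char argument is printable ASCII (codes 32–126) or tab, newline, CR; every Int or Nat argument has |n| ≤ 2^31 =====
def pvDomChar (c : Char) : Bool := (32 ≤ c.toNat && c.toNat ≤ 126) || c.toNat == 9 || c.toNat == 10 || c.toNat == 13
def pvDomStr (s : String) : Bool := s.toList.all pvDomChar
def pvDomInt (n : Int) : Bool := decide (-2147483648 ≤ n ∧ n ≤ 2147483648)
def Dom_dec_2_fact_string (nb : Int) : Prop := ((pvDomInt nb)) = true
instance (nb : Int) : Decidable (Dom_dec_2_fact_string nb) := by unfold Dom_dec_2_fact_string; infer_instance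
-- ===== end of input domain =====

-- B replaces A's least-significant-first division loop plus string reversal by a factorial
-- table and one most-significant-first pass (objective: alternative; return value only).

-- ===== PORT A =====

-- digit → one-character string: str(d) for d < 10, else ascii_lowercase[d - 10]
-- (this expression appears verbatim in both Pythons; the IndexError branch of the
-- subscript, d ≥ 36, is unreachable for every nb admitted by Dom_, so `.getD "?"` never fires)
def pvDigitChar (d : Int) : String :=
  if d < 10 then PySem.Int.toStr d
  else ((PySem.Str.pyGet? "abcdefghijklmnopqrstuvwxyz" (d - 10)).map
          (fun c => String.ofList [c])).getD "?"

-- the while loop: state (nb, i, string)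
def pvLoopA (nb i : Int) (s : String) : String :=
  if 0 < nb then
    pvLoopA (PySem.Int.floordiv nb i) (i + 1) (s ++ pvDigitChar (PySem.Int.mod nb i))
  else s
termination_by nb.toNat * 2 + (if i ≤ 1 then 1 else 0)
decreasing_by
  rename_i h
  show (PySem.Int.floordiv nb i).toNat * 2 + (if i + 1 ≤ 1 then 1 else 0) <
    nb.toNat * 2 + (if i ≤ 1 then 1 else 0)
  rcases lt_trichotomy i 1 with hi | hi | hi
  · -- i ≤ 0 : quotient is ≤ 0, measure drops to at most 1
    have h0 : PySem.Int.floordiv nb i ≤ 0 :=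
      Int.fdiv_nonpos_of_nonneg_of_nonpos (le_of_lt h) (by omega)
    have h1 : (PySem.Int.floordiv nb i).toNat = 0 := Int.toNat_of_nonpos h0
    have h3 : (if i + 1 ≤ 1 then 1 else 0) ≤ 1 := by split <;> omega
    have h4 : 1 ≤ (if i ≤ 1 then (1 : Nat) else 0) := by rw [if_pos (by omega)]
    omega
  · -- i = 1 : nb unchanged, the i-guard falls from 1 to 0
    subst hi
    simp [PySem.Int.floordiv, Int.fdiv_one]
  · -- i ≥ 2 : the quotient strictly shrinks
    have h2 : PySem.Int.floordiv nb i = nb / i := PySem.Int.floordiv_eq_ediv_of_pos (by omega)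
    have hlt : nb / i < nb := Int.ediv_lt_of_lt_mul (by omega) (by nlinarith)
    rw [h2, if_neg (by omega : ¬ (i + 1 ≤ 1)), if_neg (by omega : ¬ (i ≤ 1))]
    omega

def dec_2_fact_string (nb : Int) : String :=
  -- string[::-1].upper() ; slice? with step -1 is never none, `.getD ""` never fires
  PySem.Str.upper ((PySem.Str.slice? (pvLoopA nb 1 "") none none (-1)).getD "")

-- ===== PORT B =====

-- the while loop growing the factorial table (fuel only makes the recursion total in Lean;
-- nb.toNat + 1 iterations are proved sufficient, so the fuel never runs out on 0 < nb)
def pvGrowFacts : Nat → Int → List Int → List Int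
  | 0, _, facts => facts
  | fuel + 1, nb, facts =>
    -- facts[-1] : the list is never empty, so `.getD 0` never fires
    if (PySem.List.pyGet? facts (-1)).getD 0 * (facts.length : Int) ≤ nb then
      pvGrowFacts fuel nb (facts ++ [(PySem.List.pyGet? facts (-1)).getD 0 * (facts.length : Int)])
    else facts

-- the for loop over reversed(facts): state (nb, out)
def pvMsdLoop : List Int → Int → List String → List String
  | [], _, out => out
  | f :: rest, nb, out =>
    pvMsdLoop rest (PySem.Int.mod nb f)
      (out ++ [pvDigitChar (PySem.Int.floordiv nb f)])

def dec_2_fact_string_alt (nb : Int) : String :=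
  if nb ≤ 0 then ""
  else
    PySem.Str.upper (PySem.Str.join ""
      (pvMsdLoop (pvGrowFacts (nb.toNat + 1) nb [1]).reverse nb []))

-- ===== PRECONDITION & SPEC =====
def Spec_dec_2_fact_string (nb : Int) (out : String) : Prop := out = dec_2_fact_string_alt nb
instance (nb : Int) (out : String) : Decidable (Spec_dec_2_fact_string nb out) := by unfold Spec_dec_2_fact_string; infer_instance

-- ===== CLAIM (what is proved, stated in full; the proofs are below) =====
def Claim_equal_dec_2_fact_string : Prop := ∀ (nb : Int), Dom_dec_2_fact_string nb → Spec_dec_2_fact_string nb (dec_2_fact_string nb)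

-- ===== LEMMAS AND PROOFS =====

-- ---- abstract factorial-base digits, over Nat ----

-- rising factorial: pvRF i s = i · (i+1) ⋯ (i+s-1)
def pvRF (i s : Nat) : Nat :=
  match s with
  | 0 => 1
  | s + 1 => i * pvRF (i + 1) s

-- s least-significant-first digits of nb at radices i, i+1, …
def pvDigF (nb i : Nat) (s : Nat) : List Nat :=
  match s with
  | 0 => []
  | s + 1 => (nb % i) :: pvDigF (nb / i) (i + 1) s

-- A's digit stream: least-significant first, while nb > 0
def pvDigL (nb i : Nat) : List Nat :=
  if 0 < nb then (nb % i) :: pvDigL (nb / i) (i + 1) else []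
termination_by nb * 2 + (if i ≤ 1 then 1 else 0)
decreasing_by
  rename_i h
  rcases lt_trichotomy i 1 with hi | hi | hi
  · interval_cases i
    rw [Nat.div_zero, if_pos (by omega : 0 + 1 ≤ 1), if_pos (by omega : (0:Nat) ≤ 1)]
    omega
  · subst hi; simp
  · have hlt : nb / i < nb := Nat.div_lt_self h hi
    rw [if_neg (by omega : ¬ (i + 1 ≤ 1)), if_neg (by omega : ¬ (i ≤ 1))]
    omega

-- B's digit stream: most-significant first, along a list of place values
def pvMsdN (nb : Nat) (fs : List Nat) : List Nat :=
  match fs with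
  | [] => []
  | f :: rest => (nb / f) :: pvMsdN (nb % f) rest

-- place values k!, (k-1)!, …, 0!
def pvFactsDown (k : Nat) : List Nat :=
  match k with
  | 0 => [1]
  | k + 1 => (k + 1).factorial :: pvFactsDown k

-- the character a digit prints as (before .upper())
def pvCharN (d : Nat) : Char :=
  if d < 10 then Char.ofNat (48 + d) else if d < 36 then Char.ofNat (87 + d) else '?'

-- the highest factorial-base place of n
def pvK (n : Nat) : Nat := Nat.findGreatest (fun k => k.factorial ≤ n) n

-- ascending factorial table as B builds it
def pvFactsUp (j : Nat) : List Int :=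
  (List.range (j + 1)).map (fun p => ((p.factorial : Nat) : Int))

lemma pvRF_succ_right (s : Nat) : ∀ i, pvRF i (s + 1) = pvRF i s * (i + s) := by
  induction s with
  | zero => intro i; simp [pvRF]
  | succ s ih => intro i; rw [show pvRF i (s+2) = i * pvRF (i+1) (s+1) from rfl, ih (i+1)]
                 simp [pvRF]; ring

lemma pvRF_one (s : Nat) : pvRF 1 s = s.factorial := by
  induction s with
  | zero => rfl
  | succ s ih => rw [pvRF_succ_right, ih, Nat.factorial_succ]; ring

lemma pvRF_pos {i : Nat} (hi : 1 ≤ i) (s : Nat) : 0 < pvRF i s := by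
  induction s generalizing i with
  | zero => simp [pvRF]
  | succ s ih => exact Nat.mul_pos (by omega) (ih (by omega))

lemma pvDigF_split (s : Nat) : ∀ i nb, 1 ≤ i → nb < pvRF i (s + 1) →
    pvDigF nb i (s + 1) = pvDigF (nb % pvRF i s) i s ++ [nb / pvRF i s] := by
  induction s with
  | zero =>
    intro i nb hi hlt
    have h1 : nb < i := by simpa [pvRF] using hlt
    simp [pvDigF, pvRF, Nat.mod_eq_of_lt h1]
  | succ s ih =>
    intro i nb hi hlt
    have hR : pvRF i (s + 2) = i * pvRF (i + 1) (s + 1) := rfl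
    rw [hR] at hlt
    have hdivlt : nb / i < pvRF (i + 1) (s + 1) :=
      (Nat.div_lt_iff_lt_mul (by omega)).2 (by rw [Nat.mul_comm]; exact hlt)
    have hsplit := ih (i + 1) (nb / i) (by omega) hdivlt
    have hRs : pvRF i (s + 1) = i * pvRF (i + 1) s := rfl
    have hL : pvDigF nb i (s + 1 + 1) = (nb % i) :: pvDigF (nb / i) (i + 1) (s + 1) := rfl
    have hRr : pvDigF (nb % pvRF i (s + 1)) i (s + 1)
        = ((nb % pvRF i (s + 1)) % i) :: pvDigF ((nb % pvRF i (s + 1)) / i) (i + 1) s := rfl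
    rw [hL, hsplit, hRr, hRs, Nat.mod_mod_of_dvd nb (dvd_mul_right i _),
        Nat.mod_mul_right_div_self, Nat.div_div_eq_div_mul]
    simp

lemma pvDigL_eq_pvDigF (k : Nat) : ∀ i nb, 1 ≤ i → pvRF i k ≤ nb → nb < pvRF i (k + 1) →
    pvDigL nb i = pvDigF nb i (k + 1) := by
  induction k with
  | zero =>
    intro i nb hi hle hlt
    have hle' : 1 ≤ nb := by simpa [pvRF] using hle
    have hlt' : nb < i := by simpa [pvRF] using hlt
    rw [pvDigL, if_pos (by omega), show nb / i = 0 from Nat.div_eq_of_lt (by omega),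
        pvDigL, if_neg (by omega)]
    simp [pvDigF]
  | succ k ih =>
    intro i nb hi hle hlt
    have hR1 : pvRF i (k + 1) = i * pvRF (i + 1) k := rfl
    have hR2 : pvRF i (k + 2) = i * pvRF (i + 1) (k + 1) := rfl
    have hpos : 0 < pvRF i (k + 1) := pvRF_pos hi (k + 1)
    rw [pvDigL, if_pos (by omega)]
    have hle' : pvRF (i + 1) k ≤ nb / i :=
      (Nat.le_div_iff_mul_le (by omega)).2 (by rw [hR1] at hle; rw [Nat.mul_comm]; exact hle)
    have hlt' : nb / i < pvRF (i + 1) (k + 1) :=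
      (Nat.div_lt_iff_lt_mul (by omega)).2 (by rw [hR2] at hlt; rw [Nat.mul_comm]; exact hlt)
    rw [ih (i + 1) (nb / i) (by omega) hle' hlt']
    rfl

lemma pvMsd_eq_rev (k : Nat) : ∀ nb, nb < (k + 1).factorial →
    pvMsdN nb (pvFactsDown k) = (pvDigF nb 1 (k + 1)).reverse := by
  induction k with
  | zero =>
    intro nb h
    have : nb = 0 := by simpa [Nat.factorial] using h
    subst this
    rfl
  | succ k ih =>
    intro nb h
    have hs := pvDigF_split (k + 1) 1 nb (le_refl 1)
      (by rw [pvRF_one]; exact h)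
    rw [show pvMsdN nb (pvFactsDown (k + 1))
          = (nb / (k + 1).factorial) :: pvMsdN (nb % (k + 1).factorial) (pvFactsDown k) from rfl,
        ih _ (Nat.mod_lt _ (Nat.factorial_pos _)), hs, pvRF_one]
    simp

-- ---- pvK facts ----

lemma pvK_fact_le {n : Nat} (hn : 1 ≤ n) : (pvK n).factorial ≤ n := by
  unfold pvK
  exact Nat.findGreatest_spec (P := fun k => k.factorial ≤ n) (Nat.zero_le n) (by simpa using hn)

lemma pvK_lt_fact_succ (n : Nat) : n < (pvK n + 1).factorial := by
  by_cases h : pvK n + 1 ≤ n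
  · by_contra hc
    refine Nat.findGreatest_is_greatest (P := fun k => k.factorial ≤ n)
      ?_ h (Nat.not_lt.1 hc)
    unfold pvK
    exact Nat.lt_succ_self _
  · exact lt_of_lt_of_le (by omega) (Nat.self_le_factorial _)

lemma pvK_ge {n j : Nat} (hj : j.factorial ≤ n) : j ≤ pvK n := by
  unfold pvK
  exact Nat.le_findGreatest (le_trans (Nat.self_le_factorial j) hj) hj

-- ---- bridges between the ports and the abstract digits ----

lemma pvDigitChar_toList (d : Nat) : (pvDigitChar (d : Int)).toList = [pvCharN d] := by
  by_cases h10 : d < 10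
  · interval_cases d <;> decide
  · by_cases h36 : d < 36
    · interval_cases d <;> decide
    · have hq : pvCharN d = '?' := by
        unfold pvCharN; rw [if_neg (by omega), if_neg (by omega)]
      unfold pvDigitChar
      rw [if_neg (by omega),
          show ((d : Int) - 10) = ((d - 10 : Nat) : Int) from by omega,
          PySem.Str.pyGet?_natCast,
          List.getElem?_eq_none (by rw [show ("abcdefghijklmnopqrstuvwxyz".toList).length = 26 from rfl]; omega)]
      simp [hq]

lemma pvLoopA_toList (M : Nat) : ∀ (nb i : Int) (s : String),
    nb.toNat * 2 + (if i ≤ 1 then 1 else 0) ≤ M → 0 ≤ nb → 1 ≤ i →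
    (pvLoopA nb i s).toList = s.toList ++ (pvDigL nb.toNat i.toNat).map pvCharN := by
  induction M with
  | zero =>
    intro nb i s hM h0 hi
    rw [pvLoopA, if_neg (by omega), pvDigL, if_neg (by omega)]
    simp
  | succ M ihM =>
    intro nb i s hM h0 hi
    by_cases hpos : 0 < nb
    · rw [pvLoopA, if_pos hpos]
      have hnb : ((nb.toNat : Nat) : Int) = nb := Int.toNat_of_nonneg h0
      have hii : ((i.toNat : Nat) : Int) = i := Int.toNat_of_nonneg (by omega)
      have hfd : PySem.Int.floordiv nb i = ((nb.toNat / i.toNat : Nat) : Int) := by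
        conv_lhs => rw [← hnb, ← hii]
        rw [PySem.Int.floordiv_natCast]
      have hmd : PySem.Int.mod nb i = ((nb.toNat % i.toNat : Nat) : Int) := by
        conv_lhs => rw [← hnb, ← hii]
        rw [PySem.Int.mod_natCast]
      have hmeas : ((nb.toNat / i.toNat : Nat) : Int).toNat * 2 + (if i + 1 ≤ 1 then 1 else 0) ≤ M := by
        rw [Int.toNat_natCast, if_neg (by omega : ¬ (i + 1 ≤ 1))]
        by_cases hone : i ≤ 1
        · rw [if_pos hone] at hM
          rw [show i.toNat = 1 from by omega, Nat.div_one]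
          omega
        · rw [if_neg hone] at hM
          have : nb.toNat / i.toNat < nb.toNat := Nat.div_lt_self (by omega) (by omega)
          omega
      rw [hfd, hmd, ihM _ _ _ hmeas (Int.natCast_nonneg _) (by omega),
          String.toList_append, pvDigitChar_toList, Int.toNat_natCast,
          show (i + 1).toNat = i.toNat + 1 from by omega]
      conv_rhs => rw [pvDigL, if_pos (show 0 < nb.toNat by omega)]
      simp
    · rw [pvLoopA, if_neg hpos, pvDigL, if_neg (by omega)]
      simp

lemma pvPyGetLast (xs : List Int) (a : Int) : PySem.List.pyGet? (xs ++ [a]) (-1) = some a := by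
  simp [PySem.List.pyGet?, PySem.List.pyIdx?]

lemma pvGrow_eq (fuel : Nat) : ∀ (j : Nat) (nb : Int), 0 < nb →
    ((j.factorial : Nat) : Int) ≤ nb → pvK nb.toNat < j + fuel →
    pvGrowFacts fuel nb (pvFactsUp j) = pvFactsUp (pvK nb.toNat) := by
  induction fuel with
  | zero =>
    intro j nb h0 hle hK
    exfalso
    have hle' : j.factorial ≤ nb.toNat := by omega
    have := pvK_ge hle'
    omega
  | succ fuel ih =>
    intro j nb h0 hle hK
    have hsplit : pvFactsUp j
        = (List.range j).map (fun p => ((p.factorial : Nat) : Int)) ++ [((j.factorial : Nat) : Int)] := by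
      simp [pvFactsUp, List.range_succ]
    have hlast : (PySem.List.pyGet? (pvFactsUp j) (-1)).getD 0 = ((j.factorial : Nat) : Int) := by
      rw [hsplit, pvPyGetLast]
      rfl
    have hlen : ((pvFactsUp j).length : Int) = ((j + 1 : Nat) : Int) := by
      simp [pvFactsUp]
    have hfact : ((j.factorial : Nat) : Int) * ((j + 1 : Nat) : Int) = (((j + 1).factorial : Nat) : Int) := by
      push_cast [Nat.factorial_succ]
      ring
    rw [pvGrowFacts, hlast, hlen, hfact]
    by_cases hg : (((j + 1).factorial : Nat) : Int) ≤ nb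
    · rw [if_pos hg,
          show pvFactsUp j ++ [(((j + 1).factorial : Nat) : Int)] = pvFactsUp (j + 1) from by
            simp [pvFactsUp, List.range_succ]]
      exact ih (j + 1) nb h0 hg (by omega)
    · rw [if_neg hg]
      have hj1 : j ≤ pvK nb.toNat := pvK_ge (by omega)
      have hj2 : pvK nb.toNat ≤ j := by
        by_contra hc
        have h1 : (j + 1).factorial ≤ (pvK nb.toNat).factorial := Nat.factorial_le (by omega)
        have h2 : (pvK nb.toNat).factorial ≤ nb.toNat := pvK_fact_le (by omega)
        omega
      rw [le_antisymm hj1 hj2]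

lemma pvFactsUp_reverse (k : Nat) :
    (pvFactsUp k).reverse = (pvFactsDown k).map (fun n => ((n : Nat) : Int)) := by
  induction k with
  | zero => simp [pvFactsUp, pvFactsDown]
  | succ k ih =>
    rw [show pvFactsUp (k + 1) = pvFactsUp k ++ [(((k + 1).factorial : Nat) : Int)] from by
          simp [pvFactsUp, List.range_succ],
        List.reverse_append, ih]
    simp [pvFactsDown]

lemma pvFactsDown_pos (k : Nat) : ∀ f ∈ pvFactsDown k, 0 < f := by
  induction k with
  | zero => simp [pvFactsDown]
  | succ k ih =>
    intro f hf
    rcases (by simpa [pvFactsDown] using hf : f = (k + 1).factorial ∨ f ∈ pvFactsDown k) with h | h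
    · rw [h]; exact Nat.factorial_pos _
    · exact ih f h

lemma pvMsdLoop_eq (fsN : List Nat) : ∀ (nb : Int) (out : List String), 0 ≤ nb →
    (∀ f ∈ fsN, 0 < f) →
    pvMsdLoop (fsN.map (fun n => ((n : Nat) : Int))) nb out =
      out ++ (pvMsdN nb.toNat fsN).map (fun d => pvDigitChar ((d : Nat) : Int)) := by
  induction fsN with
  | nil =>
    intro nb out h0 hf
    simp [pvMsdLoop, pvMsdN]
  | cons f rest ih =>
    intro nb out h0 hf
    have hfpos : 0 < f := hf f (by simp)
    have hnb : ((nb.toNat : Nat) : Int) = nb := Int.toNat_of_nonneg h0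
    have hfd : PySem.Int.floordiv nb ((f : Nat) : Int) = ((nb.toNat / f : Nat) : Int) := by
      conv_lhs => rw [← hnb]
      rw [PySem.Int.floordiv_natCast]
    have hmd : PySem.Int.mod nb ((f : Nat) : Int) = ((nb.toNat % f : Nat) : Int) := by
      conv_lhs => rw [← hnb]
      rw [PySem.Int.mod_natCast]
    rw [List.map_cons, pvMsdLoop, hfd, hmd,
        ih _ _ (Int.natCast_nonneg _) (fun g hg => hf g (by simp [hg])),
        Int.toNat_natCast,
        show pvMsdN nb.toNat (f :: rest) = (nb.toNat / f) :: pvMsdN (nb.toNat % f) rest from rfl]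
    simp

-- ===== VERDICT (by name: the statement is the Claim_ definition above) =====
theorem dec_2_fact_string_spec : Claim_equal_dec_2_fact_string := by
  unfold Claim_equal_dec_2_fact_string
  intro nb _
  unfold Spec_dec_2_fact_string
  by_cases h0 : nb ≤ 0
  · unfold dec_2_fact_string dec_2_fact_string_alt
    rw [pvLoopA, if_neg (by omega), if_pos h0]
    decide
  · replace h0 : 0 < nb := by omega
    have hn1 : 1 ≤ nb.toNat := by omega
    have hfle : (pvK nb.toNat).factorial ≤ nb.toNat := pvK_fact_le hn1
    have hflt : nb.toNat < (pvK nb.toNat + 1).factorial := pvK_lt_fact_succ nb.toNat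
    apply String.ext
    have hA : (dec_2_fact_string nb).toList
        = PySem.Chars.upper (((pvDigL nb.toNat 1).map pvCharN).reverse) := by
      unfold dec_2_fact_string
      rw [PySem.Str.slice?_none_none_neg_one, Option.getD_some, PySem.Str.toList_upper,
          String.toList_ofList,
          pvLoopA_toList (nb.toNat * 2 + 1) nb 1 ""
            (by rw [if_pos (by omega : (1 : Int) ≤ 1)]) h0.le (le_refl 1)]
      simp
    have hgrow : pvGrowFacts (nb.toNat + 1) nb [1] = pvFactsUp (pvK nb.toNat) := by
      rw [show [(1 : Int)] = pvFactsUp 0 from by simp [pvFactsUp]]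
      refine pvGrow_eq (nb.toNat + 1) 0 nb h0 (by simp; omega) ?_
      have hKn : pvK nb.toNat ≤ nb.toNat := le_trans (Nat.self_le_factorial _) hfle
      omega
    have hB : (dec_2_fact_string_alt nb).toList
        = PySem.Chars.upper ((pvMsdN nb.toNat (pvFactsDown (pvK nb.toNat))).map pvCharN) := by
      unfold dec_2_fact_string_alt
      rw [if_neg (by omega), hgrow, pvFactsUp_reverse,
          pvMsdLoop_eq _ nb [] h0.le (pvFactsDown_pos _),
          PySem.Str.toList_upper, PySem.Str.toList_join,
          List.nil_append, List.map_map,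
          show (String.toList ∘ fun d => pvDigitChar ((d : Nat) : Int)) = fun d => [pvCharN d] from
            funext (fun d => pvDigitChar_toList d),
          show (fun (d : Nat) => [pvCharN d]) = (fun c => [c]) ∘ pvCharN from rfl,
          ← List.map_map,
          show ("" : String).toList = [] from rfl,
          PySem.Chars.join_nil_singletons]
    rw [hA, hB,
        pvDigL_eq_pvDigF (pvK nb.toNat) 1 nb.toNat (le_refl 1)
          (by rw [pvRF_one]; exact hfle) (by rw [pvRF_one]; exact hflt),
        pvMsd_eq_rev _ _ hflt, List.map_reverse]
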